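-- pv_equiv track=rewrite | github.com/heiervang-technologies/nmiai | tasks/accounting/plot_progress.py | cumulative_family_coverage
-- ===== SOURCE A (Python) =====
-- def cumulative_family_coverage(rows: list[dict]) -> list[int]:
--     seen = set()
--     values = []
--     for row in rows:
--         family = row.get('family')
--         if family:
--             seen.add(family)
--         values.append(len(seen))
--     return values
-- ===== SOURCE B (Python) =====
-- def cumulative_family_coverage(rows: list[dict]) -> list[int]:
--     # Pass 1: per-row contribution (1 when a new truthy family appears, else 0).
--     seen = set()
--     inc = []
--     for row in rows:
--         family = row.get('family')
--         if family and family not in seen: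
--             seen.add(family)
--             inc.append(1)
--         else:
--             inc.append(0)
--     # Pass 2: prefix sums of the contributions.
--     out = []
--     total = 0
--     for x in inc:
--         total += x
--         out.append(total)
--     return out
-- ===== Notes on version B (the rewrite author's own statement) =====
-- stated objective: alternative
-- what changed: B splits the single loop that appends len(seen) into two passes: first a per-row 0/1 increment list (1 when a new truthy family is seen), then a prefix-sum pass producing the cumulative counts.
import Mathlib
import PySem

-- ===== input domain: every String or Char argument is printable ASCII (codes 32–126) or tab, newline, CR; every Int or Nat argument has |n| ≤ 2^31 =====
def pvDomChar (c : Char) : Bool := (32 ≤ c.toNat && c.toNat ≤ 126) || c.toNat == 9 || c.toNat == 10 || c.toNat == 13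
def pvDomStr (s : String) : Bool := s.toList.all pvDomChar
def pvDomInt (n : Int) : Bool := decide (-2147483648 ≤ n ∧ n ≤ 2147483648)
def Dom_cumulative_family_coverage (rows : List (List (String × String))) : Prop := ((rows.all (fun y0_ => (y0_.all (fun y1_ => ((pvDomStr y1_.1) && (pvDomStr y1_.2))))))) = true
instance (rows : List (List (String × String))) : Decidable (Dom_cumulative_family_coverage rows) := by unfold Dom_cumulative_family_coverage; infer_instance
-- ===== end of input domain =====

-- B replaces the single loop appending len(seen) by two passes (0/1 increments, then prefix sums);
-- same O(n) cost, a different decomposition ("alternative").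

-- ===== PORT A =====
-- the for-loop of A, carrying the loop state (seen, values)
def pvGoA (rows : List (List (String × String))) (seen : PySem.Set String)
    (values : List Int) : List Int :=
  match rows with
  | [] => values
  | row :: rs =>
    let family := (PySem.Dict.mk row).get? "family"
    let seen' := match family with
      | none => seen
      | some s => if s = "" then seen else PySem.Set.add seen s
    pvGoA rs seen' (values ++ [PySem.Set.len seen'])

def cumulative_family_coverage (rows : List (List (String × String))) : List Int :=
  pvGoA rows PySem.Set.empty []

-- ===== PORT B =====
-- B's first loop: per-row 0/1 contributions
def pvGoInc (rows : List (List (String × String))) (seen : PySem.Set String)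
    (inc : List Int) : List Int :=
  match rows with
  | [] => inc
  | row :: rs =>
    let family := (PySem.Dict.mk row).get? "family"
    match family with
    | none => pvGoInc rs seen (inc ++ [0])
    | some s =>
      if s ≠ "" ∧ PySem.Set.contains seen s = false then
        pvGoInc rs (PySem.Set.add seen s) (inc ++ [1])
      else
        pvGoInc rs seen (inc ++ [0])

-- B's second loop: prefix sums
def pvGoSum (xs : List Int) (total : Int) (out : List Int) : List Int :=
  match xs with
  | [] => out
  | x :: rest => pvGoSum rest (total + x) (out ++ [total + x])

def cumulative_family_coverage_alt (rows : List (List (String × String))) : List Int :=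
  pvGoSum (pvGoInc rows PySem.Set.empty []) 0 []

-- ===== PRECONDITION & SPEC =====
def Spec_cumulative_family_coverage (rows : List (List (String × String))) (out : List Int) : Prop := out = cumulative_family_coverage_alt rows
instance (rows : List (List (String × String))) (out : List Int) : Decidable (Spec_cumulative_family_coverage rows out) := by unfold Spec_cumulative_family_coverage; infer_instance

-- ===== CLAIM (what is proved, stated in full; the proofs are below) =====
def Claim_equal_cumulative_family_coverage : Prop := ∀ (rows : List (List (String × String))), Dom_cumulative_family_coverage rows → Spec_cumulative_family_coverage rows (cumulative_family_coverage rows)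

-- ===== LEMMAS AND PROOFS =====

theorem pvGoA_append (rows : List (List (String × String))) (seen : PySem.Set String)
    (vs : List Int) : pvGoA rows seen vs = vs ++ pvGoA rows seen [] := by
  induction rows generalizing seen vs with
  | nil => simp [pvGoA]
  | cons row rs ih =>
    simp only [pvGoA]
    rw [ih, ih _ ([] ++ _)]
    simp

theorem pvGoInc_append (rows : List (List (String × String))) (seen : PySem.Set String)
    (inc : List Int) : pvGoInc rows seen inc = inc ++ pvGoInc rows seen [] := by
  induction rows generalizing seen inc with
  | nil => simp [pvGoInc]
  | cons row rs ih =>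
    simp only [pvGoInc]
    cases h : (PySem.Dict.mk row).get? "family" with
    | none => rw [ih, ih _ ([] ++ _)]; simp
    | some s =>
      dsimp only
      split_ifs with hc
      · rw [ih, ih _ ([] ++ _)]; simp
      · rw [ih, ih _ ([] ++ _)]; simp

theorem pvGoSum_append (xs : List Int) (total : Int) (out : List Int) :
    pvGoSum xs total out = out ++ pvGoSum xs total [] := by
  induction xs generalizing total out with
  | nil => simp [pvGoSum]
  | cons x rest ih =>
    simp only [pvGoSum]
    rw [ih, ih _ ([] ++ _)]
    simp

theorem pvGoSum_single (xs : List Int) (total t : Int) :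
    pvGoSum xs total [t] = t :: pvGoSum xs total [] :=
  pvGoSum_append xs total [t]

theorem pv_main (rows : List (List (String × String))) (seen : PySem.Set String) :
    pvGoA rows seen [] = pvGoSum (pvGoInc rows seen []) (PySem.Set.len seen) [] := by
  induction rows generalizing seen with
  | nil => simp [pvGoA, pvGoInc, pvGoSum]
  | cons row rs ih =>
    simp only [pvGoA, pvGoInc]
    cases h : (PySem.Dict.mk row).get? "family" with
    | none =>
      dsimp only
      rw [pvGoA_append, pvGoInc_append, ih]
      simp [pvGoSum, pvGoSum_single]
    | some s =>
      dsimp only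
      by_cases hs : s = ""
      · have hb : ¬ (s ≠ "" ∧ PySem.Set.contains seen s = false) := by simp [hs]
        rw [if_pos hs, if_neg hb]
        rw [pvGoA_append, pvGoInc_append, ih]
        simp [pvGoSum, pvGoSum_single]
      · rw [if_neg hs]
        by_cases hc : PySem.Set.contains seen s = true
        · have hm : s ∈ seen := by simpa [PySem.Set.contains] using hc
          have hmem : PySem.Set.add seen s = seen := by simp [PySem.Set.add, hm]
          have hb : ¬ (s ≠ "" ∧ PySem.Set.contains seen s = false) := by simp [hm]
          rw [if_neg hb, hmem]
          rw [pvGoA_append, pvGoInc_append, ih]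
          simp [pvGoSum, pvGoSum_single]
        · have hc' : PySem.Set.contains seen s = false := by
            cases hcc : PySem.Set.contains seen s with
            | false => rfl
            | true => exact absurd hcc hc
          have hnm : s ∉ seen := by simpa [PySem.Set.contains] using hc'
          rw [if_pos (And.intro hs hc')]
          have hlen : (List.length (PySem.Set.add seen s) : Int) = (List.length seen : Int) + 1 := by
            simp [PySem.Set.add, hnm]
          rw [pvGoA_append, pvGoInc_append, ih]
          simp [pvGoSum, PySem.Set.len, hlen, pvGoSum_single]

-- ===== VERDICT (by name: the statement is the Claim_ definition above) =====
theorem cumulative_family_coverage_spec : Claim_equal_cumulative_family_coverage := by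
  intro rows _
  unfold Spec_cumulative_family_coverage cumulative_family_coverage cumulative_family_coverage_alt
  rw [pv_main]
  rfl
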